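-- pv_equiv track=rewrite | github.com/kevinabeykoon/tetr.ai | tetris.py | judge_move_down
-- ===== SOURCE A (Python) =====
-- BLOCK_ROW_NUM = 25
--
-- def judge_move_down(current_block, current_block_start_row, current_block_start_col, stop_all_block_list):
--     """
--     whether the block can move down
--     """
--     # get all the blocks coordinate on game board
--     stop_all_block_position = list()
--     for row, line in enumerate(stop_all_block_list):
--         for col, block in enumerate(line):
--             if block != ".":
--                 stop_all_block_position.append((row, col))
--
--     for row, line in enumerate(current_block):
--         if ((('A' in line) or ('B' in line) or ('C' in line) or ('D' in line) or ('E' in line) or ('F' in line) or ('G' in line)) and (current_block_start_row + row >= BLOCK_ROW_NUM)):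
--             return False
--
--         for col, block in enumerate(line):
--             if block != "." and (
--                     current_block_start_row + row, current_block_start_col + col) in stop_all_block_position:
--                 return False
--     return True
-- ===== SOURCE B (Python) =====
-- BLOCK_ROW_NUM = 25
--
-- def judge_move_down(current_block, current_block_start_row, current_block_start_col, stop_all_block_list):
--     """
--     whether the block can move down
--     """
--     # pass 1: boundary — a letter-bearing block row lands at or below the floor
--     for row, line in enumerate(current_block):
--         if current_block_start_row + row >= BLOCK_ROW_NUM and any(ch in "ABCDEFG" for ch in line):
--             return False
--     # pass 2: INVERTED traversal — walk the board's occupied cells and index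
--     # back into the moving block (instead of walking the block and searching
--     # the board's occupied coordinates)
--     for r, board_line in enumerate(stop_all_block_list):
--         for c, cell in enumerate(board_line):
--             if cell == ".":
--                 continue
--             br = r - current_block_start_row
--             bc = c - current_block_start_col
--             if 0 <= br < len(current_block):
--                 block_line = current_block[br]
--                 if 0 <= bc < len(block_line) and block_line[bc] != ".":
--                     return False
--     return True
-- ===== Notes on version B (the rewrite author's own statement) =====
-- stated objective: faster
-- what changed: Inverted the traversal: instead of precomputing the list of all occupied board coordinates and membership-scanning it per block cell, B does one boundary pass over the block and then scans the board's occupied cells, indexing back into the block with bounds guards.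
import Mathlib
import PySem

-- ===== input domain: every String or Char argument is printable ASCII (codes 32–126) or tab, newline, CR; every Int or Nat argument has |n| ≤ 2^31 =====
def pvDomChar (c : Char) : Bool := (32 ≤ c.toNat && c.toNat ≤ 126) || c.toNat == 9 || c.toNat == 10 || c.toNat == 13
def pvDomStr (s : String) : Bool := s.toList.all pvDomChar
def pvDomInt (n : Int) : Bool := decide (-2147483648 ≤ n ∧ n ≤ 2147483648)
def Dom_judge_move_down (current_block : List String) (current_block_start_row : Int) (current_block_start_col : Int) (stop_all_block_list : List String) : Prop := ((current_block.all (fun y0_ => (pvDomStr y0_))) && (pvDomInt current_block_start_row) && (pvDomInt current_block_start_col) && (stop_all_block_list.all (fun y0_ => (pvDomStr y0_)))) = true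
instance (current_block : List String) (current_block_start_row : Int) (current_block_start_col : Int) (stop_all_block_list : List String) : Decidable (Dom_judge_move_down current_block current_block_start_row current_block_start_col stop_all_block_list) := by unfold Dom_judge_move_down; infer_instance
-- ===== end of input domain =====

-- B inverts the traversal: a boundary pass over the block, then a scan of the BOARD's
-- occupied cells indexing back into the block, instead of A's precomputed coordinate
-- table and per-block-cell membership scan (objective: faster; measured).

-- ===== PORT A =====
-- 'ch in line' for a 1-char needle is exactly char membership in the string's characters
def pyCharIn (c : Char) (line : String) : Bool := line.toList.contains c

-- inner loop of A's first pass: positions of non-'.' cells of one line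
def aLinePos (row : Int) (cs : List Char) (col : Int) : List (Int × Int) :=
  match cs with
  | [] => []
  | c :: rest => (if c ≠ '.' then [(row, col)] else []) ++ aLinePos row rest (col + 1)

-- A's first nested pass: all occupied board coordinates
def aPositions (board : List String) (row : Int) : List (Int × Int) :=
  match board with
  | [] => []
  | line :: rest => aLinePos row line.toList 0 ++ aPositions rest (row + 1)

-- A's inner loop over one block line: early-return-False becomes returning true (hit found)
def aLineHit (r scol : Int) (cs : List Char) (col : Int) (pos : List (Int × Int)) : Bool :=
  match cs with
  | [] => false
  | ch :: rest =>
    if ch != '.' && pos.contains (r, scol + col) then true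
    else aLineHit r scol rest (col + 1) pos

-- A's outer loop over the current block
def aScan (block : List String) (row srow scol : Int) (pos : List (Int × Int)) : Bool :=
  match block with
  | [] => true
  | line :: rest =>
    if (pyCharIn 'A' line || pyCharIn 'B' line || pyCharIn 'C' line || pyCharIn 'D' line ||
        pyCharIn 'E' line || pyCharIn 'F' line || pyCharIn 'G' line) && decide (srow + row ≥ 25) then
      false
    else if aLineHit (srow + row) scol line.toList 0 pos then false
    else aScan rest (row + 1) srow scol pos

def judge_move_down (current_block : List String) (current_block_start_row : Int) (current_block_start_col : Int) (stop_all_block_list : List String) : Bool :=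
  aScan current_block 0 current_block_start_row current_block_start_col (aPositions stop_all_block_list 0)

-- ===== PORT B =====
-- bounds-guarded direct access into a list of lines: cell exists and is not '.'
-- (models Source B's '0 <= br < len(...)' / '0 <= bc < len(...)' guards + direct index)
def occAt (lines : List String) (r c : Int) : Bool :=
  if 0 ≤ r ∧ r < (lines.length : Int) then
    if 0 ≤ c ∧ c < ((lines.getD r.toNat "").toList.length : Int) then
      (lines.getD r.toNat "").toList.getD c.toNat '.' != '.'
    else false
  else false

-- B's pass 1: boundary check over the block
def bBoundary (block : List String) (row srow : Int) : Bool :=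
  match block with
  | [] => false
  | line :: rest =>
    if decide (srow + row ≥ 25) && line.toList.any (fun ch => ("ABCDEFG".toList).contains ch) then
      true
    else bBoundary rest (row + 1) srow

-- B's pass 2 inner loop: one board line, indexing back into the block
def bBoardLine (block : List String) (srow scol r : Int) (cs : List Char) (c : Int) : Bool :=
  match cs with
  | [] => false
  | cell :: rest =>
    if cell != '.' && occAt block (r - srow) (c - scol) then true
    else bBoardLine block srow scol r rest (c + 1)

-- B's pass 2 outer loop over the board
def bBoardScan (block : List String) (srow scol : Int) (board : List String) (r : Int) : Bool :=
  match board with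
  | [] => false
  | line :: rest =>
    if bBoardLine block srow scol r line.toList 0 then true
    else bBoardScan block srow scol rest (r + 1)

def judge_move_down_alt (current_block : List String) (current_block_start_row : Int) (current_block_start_col : Int) (stop_all_block_list : List String) : Bool :=
  if bBoundary current_block 0 current_block_start_row then false
  else if bBoardScan current_block current_block_start_row current_block_start_col stop_all_block_list 0 then false
  else true

-- ===== PRECONDITION & SPEC =====
def Spec_judge_move_down (current_block : List String) (current_block_start_row : Int) (current_block_start_col : Int) (stop_all_block_list : List String) (out : Bool) : Prop := out = judge_move_down_alt current_block current_block_start_row current_block_start_col stop_all_block_list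
instance (current_block : List String) (current_block_start_row : Int) (current_block_start_col : Int) (stop_all_block_list : List String) (out : Bool) : Decidable (Spec_judge_move_down current_block current_block_start_row current_block_start_col stop_all_block_list out) := by unfold Spec_judge_move_down; infer_instance

-- ===== CLAIM (what is proved, stated in full; the proofs are below) =====
def Claim_equal_judge_move_down : Prop := ∀ (current_block : List String) (current_block_start_row : Int) (current_block_start_col : Int) (stop_all_block_list : List String), Dom_judge_move_down current_block current_block_start_row current_block_start_col stop_all_block_list → Spec_judge_move_down current_block current_block_start_row current_block_start_col stop_all_block_list (judge_move_down current_block current_block_start_row current_block_start_col stop_all_block_list)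

-- ===== LEMMAS AND PROOFS =====

-- proof-side helpers: A's scan with the membership test replaced by direct indexing
def dLineHit (board : List String) (tr scol : Int) (cs : List Char) (col : Int) : Bool :=
  match cs with
  | [] => false
  | ch :: rest =>
    if ch != '.' && occAt board tr (scol + col) then true
    else dLineHit board tr scol rest (col + 1)

def dColl (board block : List String) (row srow scol : Int) : Bool :=
  match block with
  | [] => false
  | line :: rest =>
    dLineHit board (srow + row) scol line.toList 0 || dColl board rest (row + 1) srow scol

def dScan (board block : List String) (row srow scol : Int) : Bool :=
  match block with
  | [] => true
  | line :: rest =>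
    if (pyCharIn 'A' line || pyCharIn 'B' line || pyCharIn 'C' line || pyCharIn 'D' line ||
        pyCharIn 'E' line || pyCharIn 'F' line || pyCharIn 'G' line) && decide (srow + row ≥ 25) then
      false
    else if dLineHit board (srow + row) scol line.toList 0 then false
    else dScan board rest (row + 1) srow scol

def cellNe (lines : List String) (i j : Nat) : Prop :=
  i < lines.length ∧ j < (lines.getD i "").toList.length ∧ (lines.getD i "").toList.getD j '.' ≠ '.'

lemma mem_aLinePos (cs : List Char) (r0 : Int) (c0 r c : Int) :
    (r, c) ∈ aLinePos r0 cs c0 ↔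
      r = r0 ∧ 0 ≤ c - c0 ∧ c - c0 < (cs.length : Int) ∧ cs.getD (c - c0).toNat '.' ≠ '.' := by
  induction cs generalizing c0 with
  | nil =>
    simp only [aLinePos, List.not_mem_nil, List.length_nil, Nat.cast_zero, false_iff]
    rintro ⟨_, h2, h3, _⟩; omega
  | cons ch rest ih =>
    rw [aLinePos, List.mem_append, ih]
    by_cases hc : c = c0
    · subst hc
      have hz : (c - c).toNat = 0 := by omega
      simp only [hz, List.getD_cons_zero]
      constructor
      · rintro (h | ⟨_, h2, _, _⟩)
        · split_ifs at h with hch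
          · simp only [List.mem_singleton, Prod.mk.injEq] at h
            exact ⟨h.1, by omega, by simp only [List.length_cons]; push_cast; omega, by simpa [h] using hch⟩
          · simp at h
        · omega
      · rintro ⟨h1, _, _, h4⟩
        left
        have hch : ch ≠ '.' := h4
        simp [hch, h1]
    · have hidx : c ≠ c0 → 0 ≤ c - c0 → (c - c0).toNat = (c - (c0 + 1)).toNat + 1 := by omega
      constructor
      · rintro (h | ⟨h1, h2, h3, h4⟩)
        · split_ifs at h with hch
          · simp only [List.mem_singleton, Prod.mk.injEq] at h
            exact absurd h.2 hc
          · exact absurd h (List.not_mem_nil)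
        · refine ⟨h1, by omega, ?_, ?_⟩
          · simp only [List.length_cons]; push_cast; omega
          · rw [hidx hc (by omega)]; simpa using h4
      · rintro ⟨h1, h2, h3, h4⟩
        right
        refine ⟨h1, by omega, ?_, ?_⟩
        · simp only [List.length_cons] at h3; push_cast at h3 ⊢; omega
        · rw [hidx hc h2] at h4; simpa using h4

lemma occAt_neg (board : List String) (tr tc : Int) (h : tr < 0) :
    occAt board tr tc = false := by
  rw [occAt, if_neg (by omega)]

lemma occAt_cons (line : String) (rest : List String) (tr tc : Int) :
    occAt (line :: rest) tr tc =
      if tr = 0 then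
        (if 0 ≤ tc ∧ tc < (line.toList.length : Int) then line.toList.getD tc.toNat '.' != '.' else false)
      else occAt rest (tr - 1) tc := by
  by_cases h0 : tr = 0
  · subst h0
    rw [if_pos rfl]
    conv_lhs => rw [occAt]
    rw [if_pos ⟨le_refl 0, by simp only [List.length_cons]; push_cast; omega⟩]
    simp
  · rw [if_neg h0]
    by_cases hneg : tr < 0
    · rw [occAt_neg _ _ _ hneg, occAt_neg _ _ _ (by omega)]
    · have h1 : tr.toNat = (tr - 1).toNat + 1 := by omega
      conv_lhs => rw [occAt]
      conv_rhs => rw [occAt]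
      by_cases hub : tr < ((line :: rest).length : Int)
      · have hub' : tr - 1 < (rest.length : Int) := by
          simp only [List.length_cons] at hub; push_cast at hub; omega
        conv_lhs => rw [if_pos (⟨by omega, hub⟩ : 0 ≤ tr ∧ tr < ((line :: rest).length : Int))]
        conv_rhs => rw [if_pos (⟨by omega, hub'⟩ : 0 ≤ tr - 1 ∧ tr - 1 < ((rest.length : Nat) : Int))]
        simp only [h1, List.getD_cons_succ]
      · have hub' : ¬ (tr - 1 < (rest.length : Int)) := by
          simp only [List.length_cons] at hub; push_cast at hub; omega
        conv_lhs => rw [if_neg (show ¬ (0 ≤ tr ∧ tr < ((line :: rest).length : Int)) by simp only [List.length_cons]; push_cast; omega)]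
        conv_rhs => rw [if_neg (show ¬ (0 ≤ tr - 1 ∧ tr - 1 < ((rest.length : Nat) : Int)) by omega)]

lemma mem_aPositions (board : List String) (r0 r c : Int) :
    (r, c) ∈ aPositions board r0 ↔ occAt board (r - r0) c = true := by
  induction board generalizing r0 with
  | nil => simp [aPositions, occAt]
  | cons line rest ih =>
    rw [aPositions, List.mem_append, mem_aLinePos, ih, occAt_cons]
    by_cases hr : r = r0
    · subst hr
      rw [if_pos (show r - r = 0 by omega), occAt_neg _ _ _ (by omega)]
      simp only [Bool.false_eq_true, or_false, sub_zero]
      split_ifs with hp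
      · constructor
        · rintro ⟨_, _, _, h4⟩; simpa using h4
        · intro h; exact ⟨by trivial, hp.1, hp.2, by simpa using h⟩
      · simp only [iff_false]
        rintro ⟨_, h2, h3, _⟩; exact hp ⟨h2, h3⟩
    · rw [if_neg (show ¬ (r - r0 = 0) by omega),
        show r - (r0 + 1) = r - r0 - 1 by ring]
      simp [hr]

lemma contains_aPositions (board : List String) (r c : Int) :
    (aPositions board 0).contains (r, c) = occAt board r c := by
  have h := mem_aPositions board 0 r c
  rw [show r - 0 = r by omega] at h
  by_cases hb : occAt board r c = true
  · simp [h, hb]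
  · simp only [Bool.not_eq_true] at hb
    simp [h, hb]

lemma lineHit_eq (board : List String) (cs : List Char) (tr scol col : Int) :
    aLineHit tr scol cs col (aPositions board 0) = dLineHit board tr scol cs col := by
  induction cs generalizing col with
  | nil => rfl
  | cons ch rest ih => simp only [aLineHit, dLineHit, contains_aPositions, ih]

lemma scan_eq (board block : List String) (row srow scol : Int) :
    aScan block row srow scol (aPositions board 0) = dScan board block row srow scol := by
  induction block generalizing row with
  | nil => rfl
  | cons line rest ih => simp only [aScan, dScan, lineHit_eq, ih]

-- A's letter test = B's letter test on one line
lemma letters_eq (line : String) :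
    (pyCharIn 'A' line || pyCharIn 'B' line || pyCharIn 'C' line || pyCharIn 'D' line ||
     pyCharIn 'E' line || pyCharIn 'F' line || pyCharIn 'G' line)
      = line.toList.any (fun ch => ("ABCDEFG".toList).contains ch) := by
  have hl : "ABCDEFG".toList = ['A','B','C','D','E','F','G'] := rfl
  rw [Bool.eq_iff_iff]
  simp only [pyCharIn, Bool.or_eq_true, List.contains_eq_mem, decide_eq_true_eq,
    List.any_eq_true, hl, List.mem_cons, List.not_mem_nil, or_false]
  constructor
  · rintro ((((((h | h) | h) | h) | h) | h) | h) <;> exact ⟨_, h, by simp⟩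
  · rintro ⟨x, hx, (rfl | rfl | rfl | rfl | rfl | rfl | rfl)⟩ <;> tauto

-- interleaved early-return scan = boundary pass && collision pass
lemma dScan_split (board block : List String) (row srow scol : Int) :
    dScan board block row srow scol
      = (!(bBoundary block row srow) && !(dColl board block row srow scol)) := by
  induction block generalizing row with
  | nil => rfl
  | cons line rest ih =>
    rw [dScan, bBoundary, dColl, ← letters_eq]
    cases hL : (pyCharIn 'A' line || pyCharIn 'B' line || pyCharIn 'C' line || pyCharIn 'D' line ||
        pyCharIn 'E' line || pyCharIn 'F' line || pyCharIn 'G' line) <;>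
      cases hG : decide (srow + row ≥ 25) <;>
      cases hH : dLineHit board (srow + row) scol line.toList 0 <;>
      simp [ih]

lemma occAt_iff (lines : List String) (r c : Int) :
    occAt lines r c = true ↔ ∃ i j : Nat, r = (i : Int) ∧ c = (j : Int) ∧ cellNe lines i j := by
  rw [occAt]
  split_ifs with h1 h2
  · constructor
    · intro h
      refine ⟨r.toNat, c.toNat, by omega, by omega, ?_, ?_, ?_⟩
      · omega
      · omega
      · simpa using h
    · rintro ⟨i, j, hi, hj, _, _, hne⟩
      subst hi; subst hj
      simpa using hne
  · simp only [false_iff]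
    rintro ⟨i, j, hi, hj, _, hlen, _⟩
    subst hi; subst hj
    exact h2 ⟨by omega, by exact_mod_cast hlen⟩
  · simp only [false_iff]
    rintro ⟨i, j, hi, hj, hlt, _, _⟩
    subst hi; subst hj
    exact h1 ⟨by omega, by exact_mod_cast hlt⟩

lemma dLineHit_iff (board : List String) (tr scol : Int) (cs : List Char) (col : Int) :
    dLineHit board tr scol cs col = true ↔
      ∃ j : Nat, j < cs.length ∧ cs.getD j '.' ≠ '.' ∧ occAt board tr (scol + col + (j : Int)) = true := by
  induction cs generalizing col with
  | nil => simp [dLineHit]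
  | cons ch rest ih =>
    rw [dLineHit]
    constructor
    · intro h
      split_ifs at h with hc
      · simp only [Bool.and_eq_true, bne_iff_ne] at hc
        exact ⟨0, by simp, by simpa using hc.1, by rw [show scol + col + ((0:Nat):Int) = scol + col by push_cast; ring]; exact hc.2⟩
      · obtain ⟨j, hj, hne, hocc⟩ := (ih (col + 1)).1 h
        exact ⟨j + 1, by simpa using Nat.succ_lt_succ hj, by simpa using hne,
          by rw [show scol + col + ((j+1:Nat):Int) = scol + (col+1) + (j:Int) by push_cast; ring]; exact hocc⟩
    · rintro ⟨j, hj, hne, hocc⟩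
      by_cases hc : (ch != '.' && occAt board tr (scol + col)) = true
      · rw [if_pos hc]
      · rw [if_neg hc]
        cases j with
        | zero =>
          exfalso; apply hc
          simp only [Bool.and_eq_true, bne_iff_ne]
          refine ⟨by simpa using hne, ?_⟩
          rwa [show scol + col = scol + col + ((0:Nat):Int) by push_cast; ring]
        | succ j' =>
          apply (ih (col + 1)).2
          exact ⟨j', by simpa using Nat.lt_of_succ_lt_succ (by simpa using hj), by simpa using hne,
            by rwa [show scol + (col+1) + (j':Int) = scol + col + ((j'+1:Nat):Int) by push_cast; ring]⟩

lemma dColl_iff (board block : List String) (row srow scol : Int) :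
    dColl board block row srow scol = true ↔
      ∃ i : Nat, i < block.length ∧ ∃ j : Nat, j < (block.getD i "").toList.length ∧
        (block.getD i "").toList.getD j '.' ≠ '.' ∧ occAt board (srow + row + (i : Int)) (scol + (j : Int)) = true := by
  induction block generalizing row with
  | nil => simp [dColl]
  | cons line rest ih =>
    rw [dColl, Bool.or_eq_true, dLineHit_iff, ih]
    constructor
    · rintro (⟨j, hj, hne, hocc⟩ | ⟨i, hi, j, hj, hne, hocc⟩)
      · exact ⟨0, by simp, j, by simpa using hj, by simpa using hne,
by simpa using hocc⟩
      · exact ⟨i + 1, by simpa using Nat.succ_lt_succ hi, j, by simpa using hj, by simpa using hne,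
          by rwa [show srow + row + ((i+1:Nat):Int) = srow + (row+1) + (i:Int) by push_cast; ring]⟩
    · rintro ⟨i, hi, j, hj, hne, hocc⟩
      cases i with
      | zero =>
        left
        exact ⟨j, by simpa using hj, by simpa using hne,
by simpa using hocc⟩
      | succ i' =>
        right
        exact ⟨i', by simpa using Nat.lt_of_succ_lt_succ (by simpa using hi), j, by simpa using hj, by simpa using hne,
          by rwa [show srow + (row+1) + (i':Int) = srow + row + ((i'+1:Nat):Int) by push_cast; ring]⟩

lemma bBoardLine_iff (block : List String) (srow scol r : Int) (cs : List Char) (c : Int) :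
    bBoardLine block srow scol r cs c = true ↔
      ∃ j : Nat, j < cs.length ∧ cs.getD j '.' ≠ '.' ∧ occAt block (r - srow) (c + (j : Int) - scol) = true := by
  induction cs generalizing c with
  | nil => simp [bBoardLine]
  | cons ch rest ih =>
    rw [bBoardLine]
    constructor
    · intro h
      split_ifs at h with hc
      · simp only [Bool.and_eq_true, bne_iff_ne] at hc
        exact ⟨0, by simp, by simpa using hc.1,
          by rw [show c + ((0:Nat):Int) - scol = c - scol by push_cast; ring]; exact hc.2⟩
      · obtain ⟨j, hj, hne, hocc⟩ := (ih (c + 1)).1 h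
        exact ⟨j + 1, by simpa using Nat.succ_lt_succ hj, by simpa using hne,
          by rw [show c + ((j+1:Nat):Int) - scol = (c+1) + (j:Int) - scol by push_cast; ring]; exact hocc⟩
    · rintro ⟨j, hj, hne, hocc⟩
      by_cases hc : (ch != '.' && occAt block (r - srow) (c - scol)) = true
      · rw [if_pos hc]
      · rw [if_neg hc]
        cases j with
        | zero =>
          exfalso; apply hc
          simp only [Bool.and_eq_true, bne_iff_ne]
          refine ⟨by simpa using hne, ?_⟩
          rwa [show c - scol = c + ((0:Nat):Int) - scol by push_cast; ring]
        | succ j' =>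
          apply (ih (c + 1)).2
          exact ⟨j', by simpa using Nat.lt_of_succ_lt_succ (by simpa using hj), by simpa using hne,
            by rwa [show (c+1) + (j':Int) - scol = c + ((j'+1:Nat):Int) - scol by push_cast; ring]⟩

lemma bBoardScan_iff (block : List String) (srow scol : Int) (board : List String) (r : Int) :
    bBoardScan block srow scol board r = true ↔
      ∃ i : Nat, i < board.length ∧ ∃ j : Nat, j < (board.getD i "").toList.length ∧
        (board.getD i "").toList.getD j '.' ≠ '.' ∧ occAt block (r + (i : Int) - srow) ((j : Int) - scol) = true := by
  induction board generalizing r with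
  | nil => simp [bBoardScan]
  | cons line rest ih =>
    rw [bBoardScan]
    by_cases hl : bBoardLine block srow scol r line.toList 0 = true
    · rw [if_pos hl]
      obtain ⟨j, hj, hne, hocc⟩ := (bBoardLine_iff _ _ _ _ _ _).1 hl
      simp only [true_iff]
      exact ⟨0, by simp, j, by simpa using hj, by simpa using hne,
by simpa using hocc⟩
    · rw [if_neg hl, ih]
      constructor
      · rintro ⟨i, hi, j, hj, hne, hocc⟩
        exact ⟨i + 1, by simpa using Nat.succ_lt_succ hi, j, by simpa using hj, by simpa using hne,
          by rwa [show r + ((i+1:Nat):Int) - srow = (r+1) + (i:Int) - srow by push_cast; ring]⟩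
      · rintro ⟨i, hi, j, hj, hne, hocc⟩
        cases i with
        | zero =>
          exfalso; apply hl
          apply (bBoardLine_iff _ _ _ _ _ _).2
          exact ⟨j, by simpa using hj, by simpa using hne,
by simpa using hocc⟩
        | succ i' =>
          exact ⟨i', by simpa using Nat.lt_of_succ_lt_succ (by simpa using hi), j, by simpa using hj, by simpa using hne,
            by rwa [show (r+1) + (i':Int) - srow = r + ((i'+1:Nat):Int) - srow by push_cast; ring]⟩

-- the collision existentials coincide under the (srow, scol) shift
lemma coll_eq (board block : List String) (srow scol : Int) :
    dColl board block 0 srow scol = bBoardScan block srow scol board 0 := by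
  rw [Bool.eq_iff_iff, dColl_iff, bBoardScan_iff]
  constructor
  · rintro ⟨i, hi, j, hj, hne, hocc⟩
    obtain ⟨a, b, ha, hb, hcell⟩ := (occAt_iff _ _ _).1 hocc
    refine ⟨a, hcell.1, b, hcell.2.1, hcell.2.2, ?_⟩
    apply (occAt_iff _ _ _).2
    exact ⟨i, j, by omega, by omega, hi, hj, hne⟩
  · rintro ⟨i, hi, j, hj, hne, hocc⟩
    obtain ⟨a, b, ha, hb, hcell⟩ := (occAt_iff _ _ _).1 hocc
    refine ⟨a, hcell.1, b, hcell.2.1, hcell.2.2, ?_⟩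
    apply (occAt_iff _ _ _).2
    exact ⟨i, j, by omega, by omega, hi, hj, hne⟩

-- ===== VERDICT (by name: the statement is the Claim_ definition above) =====
theorem judge_move_down_spec : Claim_equal_judge_move_down := by
  intro cb sr sc board _
  unfold Spec_judge_move_down judge_move_down judge_move_down_alt
  rw [scan_eq, dScan_split, coll_eq]
  cases bBoundary cb 0 sr <;> cases bBoardScan cb sr sc board 0 <;> simp
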